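-- pv_equiv track=rewrite | github.com/zhu121705/test | query/query_interface/query_class_list.py | select_year_index
-- ===== SOURCE A (Python) =====
-- def select_year_index(query_year: int, year_ranges: list[list]) -> list[int]:
--     """
--     Selects the year range index based on the query year
--     Args:
--         query_year: the year to query
--         year_ranges: list of year ranges
--     Returns:
--         [year_lower: the lower bound of the year range
--         year_upper: the upper bound of the year range]
--     """
--     if query_year < year_ranges[0][0]:
--         year_lower = year_ranges[0][0]
--         year_upper = year_ranges[0][1]
--     elif query_year > year_ranges[-1][1]:
--         year_lower = year_ranges[-1][0]
--         year_upper = year_ranges[-1][1]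
--     else:
--         for i, year_range in enumerate(year_ranges):
--             if year_range[0] <= query_year <= year_range[1]:
--                 year_range_index = i
--                 break
--             elif query_year < year_range[0]:
--                 year_range_index = i - 1
--                 break
--
--         year_lower = year_ranges[year_range_index][0]
--         year_upper = year_ranges[year_range_index][1]
--
--     return [year_lower, year_upper]
-- ===== SOURCE B (Python) =====
-- def select_year_index(query_year: int, year_ranges: list[list]) -> list[int]:
--     """Same result as A, computed by two independent first-index searches:
--     j1 = first range containing the year, j2 = first range starting after it;
--     the answer index is j1 if it comes first, else j2 - 1."""
--     n = len(year_ranges)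
--     first = year_ranges[0]
--     last = year_ranges[-1]
--     if query_year < first[0]:
--         k = 0
--     elif query_year > last[1]:
--         k = n - 1
--     else:
--         j1 = next((i for i, r in enumerate(year_ranges)
--                    if r[0] <= query_year <= r[1]), n)
--         j2 = next((i for i, r in enumerate(year_ranges)
--                    if query_year < r[0]), n)
--         k = j1 if j1 < j2 else j2 - 1
--     return [year_ranges[k][0], year_ranges[k][1]]
-- ===== Notes on version B (the rewrite author's own statement) =====
-- stated objective: alternative
-- what changed: A's single scan with two break cases and post-loop i/i-1 indexing is replaced by two independent first-index searches (first containing range j1, first range starting after the year j2) combined by k = j1 if j1 < j2 else j2 - 1.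
-- outside the precondition, e.g. on select_year_index(2, [[1, 3], [7], [8, 9]]): A returns [1, 3], B returns [1, 3]
import Mathlib
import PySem

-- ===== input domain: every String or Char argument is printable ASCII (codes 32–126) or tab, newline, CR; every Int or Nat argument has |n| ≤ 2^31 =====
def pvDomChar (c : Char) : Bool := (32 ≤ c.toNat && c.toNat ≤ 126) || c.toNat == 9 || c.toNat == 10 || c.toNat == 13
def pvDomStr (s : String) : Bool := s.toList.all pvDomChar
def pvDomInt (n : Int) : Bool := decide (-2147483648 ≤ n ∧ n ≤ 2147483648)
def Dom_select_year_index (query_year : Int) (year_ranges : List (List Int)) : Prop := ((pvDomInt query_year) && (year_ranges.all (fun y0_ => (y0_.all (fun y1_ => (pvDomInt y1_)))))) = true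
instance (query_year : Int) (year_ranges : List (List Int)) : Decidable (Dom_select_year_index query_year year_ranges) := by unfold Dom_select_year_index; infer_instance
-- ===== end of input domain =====

-- B replaces A's single scan (two break cases, post-loop i / i-1 indexing) by two independent
-- first-index searches combined arithmetically: an alternative decomposition, same O(n) cost.

-- ===== PORT A =====
-- the for-loop of A: first index where a break fires; `some i` / `some (i-1)` are the two breaks
def pvFindA (query_year : Int) : List (List Int) → Int → Option Int
  | [], _ => none
  | r :: rest, i =>
    if PySem.List.pyGetD r 0 0 ≤ query_year ∧ query_year ≤ PySem.List.pyGetD r 1 0 then some i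
    else if query_year < PySem.List.pyGetD r 0 0 then some (i - 1)
    else pvFindA query_year rest (i + 1)

def select_year_index (query_year : Int) (year_ranges : List (List Int)) : List Int :=
  let r0 := PySem.List.pyGetD year_ranges 0 []
  if query_year < PySem.List.pyGetD r0 0 0 then
    [PySem.List.pyGetD r0 0 0, PySem.List.pyGetD r0 1 0]
  else
    let rl := PySem.List.pyGetD year_ranges (-1) []
    if PySem.List.pyGetD rl 1 0 < query_year then
      [PySem.List.pyGetD rl 0 0, PySem.List.pyGetD rl 1 0]
    else
      match pvFindA query_year year_ranges 0 with
      | some k =>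
        let r := PySem.List.pyGetD year_ranges k []
        [PySem.List.pyGetD r 0 0, PySem.List.pyGetD r 1 0]
      | none => []   -- unreachable under Pre_ (Python: UnboundLocalError)

-- ===== PORT B =====
-- first index whose range contains the year (Python: next(... if r[0] <= q <= r[1]))
def pvJ1 (query_year : Int) : List (List Int) → Int → Option Int
  | [], _ => none
  | r :: rest, i =>
    if PySem.List.pyGetD r 0 0 ≤ query_year ∧ query_year ≤ PySem.List.pyGetD r 1 0 then some i
    else pvJ1 query_year rest (i + 1)

-- first index whose range starts after the year (Python: next(... if q < r[0]))
def pvJ2 (query_year : Int) : List (List Int) → Int → Option Int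
  | [], _ => none
  | r :: rest, i =>
    if query_year < PySem.List.pyGetD r 0 0 then some i
    else pvJ2 query_year rest (i + 1)

def select_year_index_alt (query_year : Int) (year_ranges : List (List Int)) : List Int :=
  let n : Int := year_ranges.length
  let first := PySem.List.pyGetD year_ranges 0 []
  let last := PySem.List.pyGetD year_ranges (-1) []
  let k : Int :=
    if query_year < PySem.List.pyGetD first 0 0 then 0
    else if PySem.List.pyGetD last 1 0 < query_year then n - 1
    else
      let j1 := (pvJ1 query_year year_ranges 0).getD n
      let j2 := (pvJ2 query_year year_ranges 0).getD n
      if j1 < j2 then j1 else j2 - 1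
  let r := PySem.List.pyGetD year_ranges k []
  [PySem.List.pyGetD r 0 0, PySem.List.pyGetD r 1 0]

-- ===== PRECONDITION & SPEC =====
-- Pre_ = the inputs on which Python A returns: a nonempty list of ranges; the ranges A actually
-- indexes must have ≥ 2 entries. Which ranges the scan indexes depends on the break point, so in
-- the scan case Pre_ conservatively requires ALL ranges well-formed, excluding a few inputs where
-- A returns before reaching a short range (see claim cites).
def Pre_select_year_index (query_year : Int) (year_ranges : List (List Int)) : Prop :=
  year_ranges ≠ [] ∧ 1 ≤ (year_ranges.headD []).length ∧
  (if query_year < (year_ranges.headD []).headD 0 then 2 ≤ (year_ranges.headD []).length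
   else 2 ≤ (year_ranges.getLastD []).length ∧
     ((year_ranges.getLastD []).getD 1 0 < query_year ∨ ∀ r ∈ year_ranges, 2 ≤ r.length))
instance (query_year : Int) (year_ranges : List (List Int)) : Decidable (Pre_select_year_index query_year year_ranges) := by unfold Pre_select_year_index; infer_instance

def pvWitness_select_year_index : Int × List (List Int) := (5, [[1, 3], [4, 6], [7, 9]])

def Spec_select_year_index (query_year : Int) (year_ranges : List (List Int)) (out : List Int) : Prop := out = select_year_index_alt query_year year_ranges
instance (query_year : Int) (year_ranges : List (List Int)) (out : List Int) : Decidable (Spec_select_year_index query_year year_ranges out) := by unfold Spec_select_year_index; infer_instance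

-- ===== CLAIM (what is proved, stated in full; the proofs are below) =====
def Claim_equal_select_year_index : Prop := ∀ (query_year : Int) (year_ranges : List (List Int)), Dom_select_year_index query_year year_ranges → Pre_select_year_index query_year year_ranges → Spec_select_year_index query_year year_ranges (select_year_index query_year year_ranges)

-- ===== LEMMAS AND PROOFS =====

theorem pvJ1_ge {q a : Int} : ∀ {l : List (List Int)} {i : Int}, pvJ1 q l i = some a → i ≤ a := by
  intro l
  induction l with
  | nil => intro i h; simp [pvJ1] at h
  | cons r rest ih =>
    intro i h
    simp only [pvJ1] at h
    split_ifs at h with h1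
    · simp at h; omega
    · have := ih h; omega

theorem pvJ1_lt {q a : Int} : ∀ {l : List (List Int)} {i : Int}, pvJ1 q l i = some a → a < i + l.length := by
  intro l
  induction l with
  | nil => intro i h; simp [pvJ1] at h
  | cons r rest ih =>
    intro i h
    simp only [pvJ1] at h
    split_ifs at h with h1
    · simp at h; simp [List.length_cons]; omega
    · have := ih h; simp [List.length_cons]; omega

theorem pvJ2_ge {q b : Int} : ∀ {l : List (List Int)} {i : Int}, pvJ2 q l i = some b → i ≤ b := by
  intro l
  induction l with
  | nil => intro i h; simp [pvJ2] at h
  | cons r rest ih =>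
    intro i h
    simp only [pvJ2] at h
    split_ifs at h with h1
    · simp at h; omega
    · have := ih h; omega

theorem pvJ2_lt {q b : Int} : ∀ {l : List (List Int)} {i : Int}, pvJ2 q l i = some b → b < i + l.length := by
  intro l
  induction l with
  | nil => intro i h; simp [pvJ2] at h
  | cons r rest ih =>
    intro i h
    simp only [pvJ2] at h
    split_ifs at h with h1
    · simp at h; simp [List.length_cons]; omega
    · have := ih h; simp [List.length_cons]; omega

-- A's break index, in terms of B's two searches
theorem pvFindA_eq_J (q : Int) : ∀ (l : List (List Int)) (i : Int),
    pvFindA q l i =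
      match pvJ1 q l i, pvJ2 q l i with
      | none, none => none
      | some a, none => some a
      | none, some b => some (b - 1)
      | some a, some b => some (if a < b then a else b - 1) := by
  intro l
  induction l with
  | nil => intro i; simp [pvFindA, pvJ1, pvJ2]
  | cons r rest ih =>
    intro i
    by_cases h1 : PySem.List.pyGetD r 0 0 ≤ q ∧ q ≤ PySem.List.pyGetD r 1 0
    · have h2 : ¬ q < PySem.List.pyGetD r 0 0 := by omega
      simp only [pvFindA, pvJ1, pvJ2, if_pos h1, if_neg h2]
      cases hj2 : pvJ2 q rest (i + 1) with
      | none => rfl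
      | some b =>
        have := pvJ2_ge hj2
        simp only []
        rw [if_pos (by omega)]
    · by_cases h2 : q < PySem.List.pyGetD r 0 0
      · simp only [pvFindA, pvJ1, pvJ2, if_neg h1, if_pos h2]
        cases hj1 : pvJ1 q rest (i + 1) with
        | none => rfl
        | some a =>
          have := pvJ1_ge hj1
          simp only []
          rw [if_neg (by omega)]
      · simp only [pvFindA, pvJ1, pvJ2, if_neg h1, if_neg h2]
        exact ih (i + 1)

-- getLastD of a nonempty list ignores the default
theorem getLastD_irrel {α : Type} (a : α) (t : List α) (d1 d2 : α) :
    (a :: t).getLastD d1 = (a :: t).getLastD d2 := by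
  rw [List.getLastD_eq_getLast?, List.getLastD_eq_getLast?]
  cases hx : (a :: t).getLast? with
  | none => simp at hx
  | some x => rfl

-- A's loop always breaks when the year does not exceed the last upper bound
theorem pvFindA_isSome (q : Int) : ∀ (l : List (List Int)) (_ : l ≠ []) (i : Int),
    ¬ PySem.List.pyGetD (l.getLastD []) 1 0 < q → (pvFindA q l i).isSome := by
  intro l
  induction l with
  | nil => intro h; exact absurd rfl h
  | cons r rest ih =>
    intro _ i hle
    by_cases hrest : rest = []
    · subst hrest
      simp only [List.getLastD_cons, List.getLastD_nil] at hle
      simp only [pvFindA]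
      split_ifs with h1 h2
      · rfl
      · rfl
      · exfalso; omega
    · have hlast : (r :: rest).getLastD ([] : List Int) = rest.getLastD [] := by
        rw [List.getLastD_cons]
        cases rest with
        | nil => exact absurd rfl hrest
        | cons s t => exact getLastD_irrel s t r []
      rw [hlast] at hle
      simp only [pvFindA]
      split_ifs with h1 h2
      · rfl
      · rfl
      · exact ih hrest (i + 1) hle

-- negative index -1 equals index length-1 on a nonempty list
theorem pyGetD_last_idx (l : List (List Int)) (h : l ≠ []) :
    PySem.List.pyGetD l ((l.length : Int) - 1) ([] : List Int) = PySem.List.pyGetD l (-1) [] := by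
  have hp : 0 < l.length := List.length_pos_iff.mpr h
  rw [PySem.List.pyGetD_neg_ofNat l 1 ([] : List Int) (by omega) (by omega)]
  have ht : ((l.length : Int) - 1).toNat = l.length - 1 := by omega
  rw [PySem.List.pyGetD_eq_getElem l ([] : List Int) (by omega) (by omega)]
  simp [ht]

-- Python's xs[-1] is xs.getLastD on a nonempty list
theorem pyGetD_neg_one_getLastD (l : List (List Int)) (h : l ≠ []) :
    PySem.List.pyGetD l (-1) ([] : List Int) = l.getLastD [] := by
  have hp : 0 < l.length := List.length_pos_iff.mpr h
  rw [PySem.List.pyGetD_neg_ofNat l 1 ([] : List Int) (by omega) (by omega)]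
  rw [List.getLastD_eq_getLast?, List.getLast?_eq_getElem?]
  rw [List.getElem?_eq_getElem (by omega)]
  rfl

-- ===== VERDICT (by name: the statement is the Claim_ definition above) =====
theorem select_year_index_spec : Claim_equal_select_year_index := by
  intro q yr _ hpre
  obtain ⟨hne, _, _⟩ := hpre
  unfold Spec_select_year_index select_year_index select_year_index_alt
  simp only []
  by_cases hb1 : q < PySem.List.pyGetD (PySem.List.pyGetD yr 0 []) 0 0
  · rw [if_pos hb1, if_pos hb1]
  · rw [if_neg hb1, if_neg hb1]
    by_cases hb2 : PySem.List.pyGetD (PySem.List.pyGetD yr (-1) []) 1 0 < q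
    · rw [if_pos hb2, if_pos hb2, pyGetD_last_idx yr hne]
    · rw [if_neg hb2, if_neg hb2]
      have hlast : PySem.List.pyGetD yr (-1) ([] : List Int) = yr.getLastD [] :=
        pyGetD_neg_one_getLastD yr hne
      rw [hlast] at hb2
      have hsome := pvFindA_isSome q yr hne 0 hb2
      rw [pvFindA_eq_J q yr 0] at hsome ⊢
      cases hj1 : pvJ1 q yr 0 with
      | none =>
        cases hj2 : pvJ2 q yr 0 with
        | none => rw [hj1, hj2] at hsome; simp at hsome
        | some b =>
          have hblt := pvJ2_lt hj2
          simp only [Option.getD_none, Option.getD_some]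
          rw [if_neg (by omega)]
      | some a =>
        cases hj2 : pvJ2 q yr 0 with
        | none =>
          have halt := pvJ1_lt hj1
          simp only [Option.getD_none, Option.getD_some]
          rw [if_pos (by omega)]
        | some b =>
          simp only [Option.getD_some]
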